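-- pv_equiv track=rewrite | github.com/NatesVibeCode/Praxis | Code&DBs/Workflow/memory/research_runtime.py | compile_brief
-- ===== SOURCE A (Python) =====
-- def compile_brief(
--
--     query: str,
--     findings: list[str],
--     max_tokens: int = 2000,
-- ) -> str:
--     header = f"# Research Brief: {query}\n\n"
--     body_parts: list[str] = []
--     char_budget = max_tokens * 4  # rough chars-per-token estimate
--
--     for i, f in enumerate(findings, 1):
--         entry = f"## Finding {i}\n{f}\n"
--         if len(header) + sum(len(p) for p in body_parts) + len(entry) > char_budget:
--             break
--         body_parts.append(entry)
--
--     return header + "\n".join(body_parts)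
-- ===== SOURCE B (Python) =====
-- from itertools import accumulate
-- from bisect import bisect_right
--
--
-- def compile_brief(
--     query: str,
--     findings: list[str],
--     max_tokens: int = 2000,
-- ) -> str:
--     header = f"# Research Brief: {query}\n\n"
--     entries = [f"## Finding {i}\n{f}\n" for i, f in enumerate(findings, 1)]
--     cums = list(accumulate(len(e) for e in entries))
--     k = bisect_right(cums, max_tokens * 4 - len(header))
--     return header + "\n".join(entries[:k])
-- ===== Notes on version B (the rewrite author's own statement) =====
-- stated objective: alternative
-- what changed: Replaces A's per-iteration accumulate-and-break loop (which re-sums the body parts each step) by building the full entry list, a prefix-sum table of entry lengths via itertools.accumulate, and one bisect_right to locate how many leading entries fit the char budget.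
import Mathlib
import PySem

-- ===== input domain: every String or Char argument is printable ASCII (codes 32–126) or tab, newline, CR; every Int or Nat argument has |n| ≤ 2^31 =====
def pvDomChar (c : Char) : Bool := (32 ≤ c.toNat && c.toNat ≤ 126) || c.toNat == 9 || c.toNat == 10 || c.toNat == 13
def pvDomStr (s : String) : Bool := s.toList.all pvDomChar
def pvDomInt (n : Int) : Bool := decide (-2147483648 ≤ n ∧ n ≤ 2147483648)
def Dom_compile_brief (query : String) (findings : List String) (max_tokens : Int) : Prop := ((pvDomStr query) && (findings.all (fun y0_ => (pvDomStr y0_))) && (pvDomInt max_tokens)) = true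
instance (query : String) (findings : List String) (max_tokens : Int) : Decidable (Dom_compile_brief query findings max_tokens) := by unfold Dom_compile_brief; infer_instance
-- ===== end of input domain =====

-- B replaces A's per-iteration accumulate-and-break scan by building the entry list, a
-- prefix-sum table of entry lengths and one bisect_right to locate how many entries fit
-- (objective: alternative — same cost, different decomposition). Strings are handled as
-- List Char (PySem.Chars), exact for Python str on the ASCII domain.

-- shared formatting helper: f"## Finding {i}\n{f}\n" as a list of chars
def pvEntry (i : Int) (f : String) : List Char :=
  "## Finding ".toList ++ PySem.Int.toChars i ++ ['\n'] ++ f.toList ++ ['\n']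

-- f"# Research Brief: {query}\n\n"
def pvHeader (query : String) : List Char :=
  "# Research Brief: ".toList ++ query.toList ++ ['\n', '\n']

-- ===== PORT A =====
-- the for-loop: body_parts accumulator, break when the running total exceeds the budget;
-- the sum over body_parts is recomputed each iteration, as in A
def pvLoopA (hlen : Nat) (budget : Int) : List String → Int → List (List Char) → List (List Char)
  | [], _, acc => acc
  | f :: rest, i, acc =>
      let entry := pvEntry i f
      if (hlen : Int) + ((acc.map (fun p => (p.length : Int))).sum) + (entry.length : Int) > budget then
        acc
      else
        pvLoopA hlen budget rest (i + 1) (acc ++ [entry])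

def compile_brief (query : String) (findings : List String) (max_tokens : Int) : String :=
  let header := pvHeader query
  let char_budget := max_tokens * 4
  let body_parts := pvLoopA header.length char_budget findings 1 []
  String.ofList (header ++ PySem.Chars.join ['\n'] body_parts)

-- ===== PORT B =====
-- itertools.accumulate of the entry lengths (running sums starting from s)
def pvAccum (s : Int) : List (List Char) → List Int
  | [] => []
  | e :: es => (s + e.length) :: pvAccum (s + e.length) es

def compile_brief_alt (query : String) (findings : List String) (max_tokens : Int) : String :=
  let header := pvHeader query
  let entries := (PySem.List.enumerate findings 1).map (fun p => pvEntry p.1 p.2)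
  let cums := pvAccum 0 entries
  let k := PySem.List.bisectRight cums (max_tokens * 4 - (header.length : Int))
  String.ofList (header ++ PySem.Chars.join ['\n'] (entries.take k))

-- ===== PRECONDITION & SPEC =====
def Spec_compile_brief (query : String) (findings : List String) (max_tokens : Int) (out : String) : Prop := out = compile_brief_alt query findings max_tokens
instance (query : String) (findings : List String) (max_tokens : Int) (out : String) : Decidable (Spec_compile_brief query findings max_tokens out) := by unfold Spec_compile_brief; infer_instance

-- ===== CLAIM (what is proved, stated in full; the proofs are below) =====
def Claim_equal_compile_brief : Prop := ∀ (query : String) (findings : List String) (max_tokens : Int), Dom_compile_brief query findings max_tokens → Spec_compile_brief query findings max_tokens (compile_brief query findings max_tokens)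

-- ===== LEMMAS AND PROOFS =====

-- reference greedy prefix: entries that fit, given limit and the sum s consumed so far
def pvTakeFit (limit : Int) (s : Int) : List (List Char) → List (List Char)
  | [] => []
  | e :: es => if s + (e.length : Int) > limit then [] else e :: pvTakeFit limit (s + e.length) es

theorem pvAccum_length (s : Int) (es : List (List Char)) : (pvAccum s es).length = es.length := by
  induction es generalizing s with
  | nil => rfl
  | cons e es ih => simp [pvAccum, ih]

theorem pvAccum_le (s : Int) (es : List (List Char)) : ∀ c ∈ pvAccum s es, s ≤ c := by
  induction es generalizing s with
  | nil => simp [pvAccum]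
  | cons e es ih =>
      intro c hc
      simp only [pvAccum, List.mem_cons] at hc
      rcases hc with h | h
      · omega
      · have := ih (s + e.length) c h; omega

theorem pvAccum_pairwise (s : Int) (es : List (List Char)) :
    (pvAccum s es).Pairwise (· ≤ ·) := by
  induction es generalizing s with
  | nil => simp [pvAccum]
  | cons e es ih =>
      simp only [pvAccum, List.pairwise_cons]
      refine ⟨?_, ih _⟩
      intro c hc
      have := pvAccum_le (s + e.length) es c hc
      omega

-- takeFit is a prefix of es
theorem pvTakeFit_prefix (limit s : Int) (es : List (List Char)) :
    pvTakeFit limit s es <+: es := by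
  induction es generalizing s with
  | nil => simp [pvTakeFit]
  | cons e es ih =>
      simp only [pvTakeFit]
      split
      · exact List.nil_prefix
      · exact List.cons_prefix_cons.mpr ⟨rfl, ih _⟩

-- the three bisect-style properties of takeFit's length against the prefix sums
theorem pvTakeFit_spec (limit s : Int) (es : List (List Char)) :
    (pvTakeFit limit s es).length ≤ es.length ∧
    (∀ j (hj : j < (pvAccum s es).length), j < (pvTakeFit limit s es).length → (pvAccum s es)[j] ≤ limit) ∧
    (∀ hj : (pvTakeFit limit s es).length < (pvAccum s es).length,
        limit < (pvAccum s es)[(pvTakeFit limit s es).length]) := by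
  induction es generalizing s with
  | nil => simp [pvTakeFit, pvAccum]
  | cons e es ih =>
      by_cases h : s + (e.length : Int) > limit
      · simp only [pvTakeFit, if_pos h, pvAccum]
        refine ⟨by simp, ?_, ?_⟩
        · intro j hj hj'; simp at hj'
        · intro hj; simpa using h
      · obtain ⟨ih1, ih2, ih3⟩ := ih (s + e.length)
        simp only [pvTakeFit, if_neg h, pvAccum, List.length_cons]
        refine ⟨by omega, ?_, ?_⟩
        · intro j hj hjlt
          cases j with
          | zero => simpa using (by omega : s + (e.length : Int) ≤ limit)
          | succ j =>
              simp only [List.getElem_cons_succ]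
              exact ih2 j (by simpa using hj) (by omega)
        · intro hj
          simp only [List.getElem_cons_succ]
          exact ih3 (by simpa using hj)

-- bisect_right on the prefix-sum table locates exactly the greedy count
theorem bisect_eq_takeFit_length (limit s : Int) (es : List (List Char)) :
    PySem.List.bisectRight (pvAccum s es) limit = (pvTakeFit limit s es).length := by
  obtain ⟨hk1, hk2, hk3⟩ := PySem.List.bisectRight_spec (pvAccum s es) limit (pvAccum_pairwise s es)
  obtain ⟨hn1, hn2, hn3⟩ := pvTakeFit_spec limit s es
  set k := PySem.List.bisectRight (pvAccum s es) limit with hk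
  set n := (pvTakeFit limit s es).length with hn
  have hlen : (pvAccum s es).length = es.length := pvAccum_length s es
  rcases Nat.lt_trichotomy k n with h | h | h
  · have hklen : k < (pvAccum s es).length := by omega
    have h1 := hn2 k hklen h
    have h2 := hk3 k hklen (le_refl k)
    omega
  · exact h
  · have hnlen : n < (pvAccum s es).length := by omega
    have h1 := hk2 n hnlen h
    have h2 := hn3 hnlen
    omega

-- A's loop computes acc ++ the greedy prefix, with the budget shifted by what acc holds
theorem pvLoopA_eq (hlen : Nat) (budget : Int) (fs : List String) (i : Int) (acc : List (List Char)) :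
    pvLoopA hlen budget fs i acc
      = acc ++ pvTakeFit (budget - hlen) ((acc.map (fun p => (p.length : Int))).sum)
          ((PySem.List.enumerate fs i).map (fun p => pvEntry p.1 p.2)) := by
  induction fs generalizing i acc with
  | nil => simp [pvLoopA, PySem.List.enumerate_nil, pvTakeFit]
  | cons f rest ih =>
      simp only [pvLoopA, PySem.List.enumerate_cons, List.map_cons, pvTakeFit]
      by_cases h : (hlen : Int) + ((acc.map (fun p => (p.length : Int))).sum) + ((pvEntry i f).length : Int) > budget
      · rw [if_pos h, if_pos (by omega)]
        simp
      · rw [if_neg h, if_neg (by omega)]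
        rw [ih (i + 1) (acc ++ [pvEntry i f])]
        simp [List.append_assoc]

-- ===== VERDICT (by name: the statement is the Claim_ definition above) =====
theorem compile_brief_spec : Claim_equal_compile_brief := by
  intro query findings max_tokens _
  unfold Spec_compile_brief compile_brief compile_brief_alt
  simp only []
  rw [bisect_eq_takeFit_length]
  rw [pvLoopA_eq]
  have hpre := pvTakeFit_prefix (max_tokens * 4 - ((pvHeader query).length : Int)) 0
      ((PySem.List.enumerate findings 1).map (fun p => pvEntry p.1 p.2))
  rw [← List.prefix_iff_eq_take.mp hpre]
  simp
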